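-- pv_equiv track=rewrite | github.com/V-pix/labs | lab_8/lab_8_1.py | get_count_and_max
-- ===== SOURCE A (Python) =====
-- def get_count_and_max(A, k):
--     n = len(A)
--     count = 0
--     maximum = None
--
--     for i in range(n):
--         for j in range(n):
--             if A[i][j] % k == 0:
--                 count += 1
--                 if maximum is None or A[i][j] > maximum:
--                     maximum = A[i][j]
--     return count, maximum
-- ===== SOURCE B (Python) =====
-- def get_count_and_max(A, k):
--     n = len(A)
--     divs = sorted((A[i][j] for i in range(n) for j in range(n) if A[i][j] % k == 0),
--                   reverse=True)
--     return len(divs), (divs[0] if divs else None)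
-- ===== Notes on version B (the rewrite author's own statement) =====
-- stated objective: alternative
-- what changed: Instead of a stateful double loop tracking a running count and running maximum with a None sentinel, B collects the qualifying entries, sorts them in descending order, and reads the count as the list length and the maximum as the first element of the sorted list.
import Mathlib
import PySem

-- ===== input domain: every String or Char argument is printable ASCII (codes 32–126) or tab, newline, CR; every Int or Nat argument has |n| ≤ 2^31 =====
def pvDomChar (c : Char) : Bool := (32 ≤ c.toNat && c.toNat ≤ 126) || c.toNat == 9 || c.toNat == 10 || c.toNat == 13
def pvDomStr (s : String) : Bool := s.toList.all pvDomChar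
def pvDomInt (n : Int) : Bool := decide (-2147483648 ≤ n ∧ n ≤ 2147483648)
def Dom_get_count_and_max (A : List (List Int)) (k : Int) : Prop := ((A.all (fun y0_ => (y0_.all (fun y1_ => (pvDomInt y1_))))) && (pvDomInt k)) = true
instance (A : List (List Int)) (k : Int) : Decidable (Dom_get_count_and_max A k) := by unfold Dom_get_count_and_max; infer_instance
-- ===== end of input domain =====

-- B computes the maximum by sorting the qualifying entries in descending order and taking the
-- first element (count = length of that list), instead of A's stateful running count/max loop.


-- ===== PORT A =====
def get_count_and_max (A : List (List Int)) (k : Int) : Int × Option Int :=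
  let n : Int := A.length
  (PySem.List.pyRange 0 n 1).foldl (fun st i =>
    (PySem.List.pyRange 0 n 1).foldl (fun st j =>
      let x := PySem.List.pyGetD (PySem.List.pyGetD A i []) j 0
      if PySem.Int.mod x k = 0 then
        (st.1 + 1,
         match st.2 with
         | none => some x
         | some m => if x > m then some x else some m)
      else st) st) ((0 : Int), (none : Option Int))

-- ===== PORT B =====
def get_count_and_max_alt (A : List (List Int)) (k : Int) : Int × Option Int :=
  let n : Int := A.length
  let divs : List Int :=
    PySem.List.sorted
      ((PySem.List.pyRange 0 n 1).flatMap (fun i =>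
        ((PySem.List.pyRange 0 n 1).map (fun j =>
          PySem.List.pyGetD (PySem.List.pyGetD A i []) j 0)).filter
            (fun x => PySem.Int.mod x k = 0)))
      (fun x => x) true
  ((divs.length : Int),
   match divs with
   | [] => none
   | m :: _ => some m)

-- ===== PRECONDITION & SPEC =====
-- Pre_ excludes exactly the inputs where A raises: k = 0 with a nonempty matrix
-- (ZeroDivisionError) and matrices with a row shorter than len(A) (IndexError); B raises there too.
def Pre_get_count_and_max (A : List (List Int)) (k : Int) : Prop :=
  (k ≠ 0 ∨ A = []) ∧ ∀ row ∈ A, A.length ≤ row.length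
instance (A : List (List Int)) (k : Int) : Decidable (Pre_get_count_and_max A k) := by unfold Pre_get_count_and_max; infer_instance

def pvWitness_get_count_and_max : List (List Int) × Int := ([[1, 2], [3, 4]], 2)

def Spec_get_count_and_max (A : List (List Int)) (k : Int) (out : Int × Option Int) : Prop := out = get_count_and_max_alt A k
instance (A : List (List Int)) (k : Int) (out : Int × Option Int) : Decidable (Spec_get_count_and_max A k out) := by unfold Spec_get_count_and_max; infer_instance

-- ===== CLAIM (what is proved, stated in full; the proofs are below) =====
def Claim_equal_get_count_and_max : Prop := ∀ (A : List (List Int)) (k : Int), Dom_get_count_and_max A k → Pre_get_count_and_max A k → Spec_get_count_and_max A k (get_count_and_max A k)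

-- ===== LEMMAS AND PROOFS =====

-- A's loop body, as a step function on the state (count, maximum)
def pvStep (k : Int) (st : Int × Option Int) (x : Int) : Int × Option Int :=
  if PySem.Int.mod x k = 0 then
    (st.1 + 1,
     match st.2 with
     | none => some x
     | some m => if x > m then some x else some m)
  else st

-- the running-max update, on qualifying elements only
def pvMx (m : Option Int) (x : Int) : Option Int :=
  match m with
  | none => some x
  | some mm => if x > mm then some x else some mm

lemma pvStep_char (k : Int) (L : List Int) (c : Int) (m : Option Int) :
    L.foldl (pvStep k) (c, m) =
      (c + ((L.filter (fun x => PySem.Int.mod x k = 0)).length : Int),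
       (L.filter (fun x => PySem.Int.mod x k = 0)).foldl pvMx m) := by
  induction L generalizing c m with
  | nil => simp
  | cons x t ih =>
    simp only [List.foldl_cons, List.filter_cons]
    by_cases h : PySem.Int.mod x k = 0
    · rw [show pvStep k (c, m) x = (c + 1, pvMx m x) from by simp [pvStep, pvMx, h]]
      rw [ih]
      simp only [h, decide_true, if_true, List.length_cons]
      refine Prod.ext ?_ rfl
      push_cast
      ring
    · rw [show pvStep k (c, m) x = (c, m) from by simp [pvStep, h]]
      rw [ih]
      simp [h]

lemma pvMx_some (t : List Int) (a : Int) :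
    t.foldl pvMx (some a) = some (t.foldl max a) := by
  induction t generalizing a with
  | nil => rfl
  | cons x t ih =>
    simp only [List.foldl_cons, pvMx]
    split_ifs with h
    · rw [max_eq_right (le_of_lt h), ih]
    · rw [max_eq_left (le_of_not_gt h), ih]

lemma pvMx_max? (L : List Int) :
    L.foldl pvMx none = PySem.List.max? L (fun x => x) := by
  cases L with
  | nil => rfl
  | cons x t =>
    simp only [List.foldl_cons, pvMx, PySem.List.max?_id_cons]
    exact pvMx_some t x

-- the head of the descending sort is the maximum
lemma head_sorted_rev_eq_max? (L : List Int) :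
    PySem.List.max? L (fun x => x) =
      (match PySem.List.sorted L (fun x => x) true with
       | [] => (none : Option Int)
       | m :: _ => some m) := by
  rcases hs : PySem.List.sorted L (fun x => x) true with _ | ⟨m, t⟩
  · have hL : L = [] := (PySem.List.sorted_eq_nil_iff _ _ _).mp hs
    simp [hL, PySem.List.max?]
  · have hmem : m ∈ L := by
      have : m ∈ PySem.List.sorted L (fun x => x) true := by simp [hs]
      exact (PySem.List.mem_sorted _ _ _ _).mp this
    have hge : ∀ y ∈ L, y ≤ m := PySem.List.key_head_sorted_rev_ge _ _ hs
    rcases hM : PySem.List.max? L (fun x => x) with _ | M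
    · exact absurd ((PySem.List.max?_eq_none_iff _ _).mp hM ▸ hmem) (List.not_mem_nil)
    · have hMmem : M ∈ L := PySem.List.max?_mem hM
      have h1 : m ≤ M := PySem.List.max?_isMax hM m hmem
      have h2 : M ≤ m := hge M hMmem
      simp [le_antisymm h1 h2]

theorem get_count_and_max_spec : Claim_equal_get_count_and_max := by
  intro A k _hdom _hpre
  unfold Spec_get_count_and_max get_count_and_max get_count_and_max_alt
  simp only []
  have hA :
      (PySem.List.pyRange 0 (A.length : Int) 1).foldl (fun st i =>
        (PySem.List.pyRange 0 (A.length : Int) 1).foldl (fun st j =>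
          let x := PySem.List.pyGetD (PySem.List.pyGetD A i []) j 0
          if PySem.Int.mod x k = 0 then
            (st.1 + 1,
             match st.2 with
             | none => some x
             | some m => if x > m then some x else some m)
          else st) st) ((0 : Int), (none : Option Int))
      = ((PySem.List.pyRange 0 (A.length : Int) 1).flatMap (fun i =>
          (PySem.List.pyRange 0 (A.length : Int) 1).map (fun j =>
            PySem.List.pyGetD (PySem.List.pyGetD A i []) j 0))).foldl
          (pvStep k) ((0 : Int), (none : Option Int)) := by
    rw [List.flatMap_def, List.foldl_flatten, List.foldl_map]
    congr 1
    funext st i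
    rw [List.foldl_map]
    rfl
  rw [hA]
  set L := (PySem.List.pyRange 0 (A.length : Int) 1).flatMap (fun i =>
      (PySem.List.pyRange 0 (A.length : Int) 1).map (fun j =>
        PySem.List.pyGetD (PySem.List.pyGetD A i []) j 0)) with hL
  have hB :
      ((PySem.List.pyRange 0 (A.length : Int) 1).flatMap (fun i =>
        ((PySem.List.pyRange 0 (A.length : Int) 1).map (fun j =>
          PySem.List.pyGetD (PySem.List.pyGetD A i []) j 0)).filter
            (fun x => PySem.Int.mod x k = 0)))
      = L.filter (fun x => PySem.Int.mod x k = 0) := by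
    rw [hL, List.filter_flatMap]
  rw [hB, pvStep_char, pvMx_max?, head_sorted_rev_eq_max?]
  rw [PySem.List.length_sorted]
  simp
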